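-- pv_equiv track=rewrite | github.com/Don-Chad/juno-invitation-rag-backend-dev | custom_components/memory_manager.py | _parse_memories
-- ===== SOURCE A (Python) =====
-- from typing import List, Dict, Any
--
-- def _parse_memories(raw_content: str, existing_memories: List[str]) -> List[str]:
--     """Simple parsing of the bulleted list"""
--     new_memories = []
--     lines = raw_content.strip().split('\n')
--     for line in lines:
--         line = line.strip()
--         if line.startswith("- "):
--             memory = line[2:].strip()
--             if memory and memory not in existing_memories:
--                 new_memories.append(memory)
--
--     # Merge lists, keeping uniqueness
--     all_memories = existing_memories + new_memories
--     unique_memories = []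
--     seen = set()
--     for m in all_memories:
--         m_lower = m.lower()
--         if m_lower not in seen:
--             unique_memories.append(m)
--             seen.add(m_lower)
--
--     return unique_memories
-- ===== SOURCE B (Python) =====
-- from typing import List
--
-- def _parse_memories(raw_content: str, existing_memories: List[str]) -> List[str]:
--     """Single streaming case-insensitive dedup pass: existing first, then parsed bullets."""
--     seen = set()
--     result = []
--     for m in existing_memories:
--         ml = m.lower()
--         if ml not in seen:
--             result.append(m)
--             seen.add(ml)
--     for line in raw_content.strip().split('\n'):
--         line = line.strip()
--         if line.startswith("- "):
--             memory = line[2:].strip()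
--             if memory and memory.lower() not in seen:
--                 result.append(memory)
--                 seen.add(memory.lower())
--     return result
-- ===== Notes on version B (the rewrite author's own statement) =====
-- stated objective: simpler
-- what changed: B replaces A's three phases (collect new_memories with a case-sensitive existing-membership filter, concatenate, then a separate case-insensitive dedup pass) by one streaming dedup: a single seen-set threaded first over existing_memories and then directly over the parsed bullet lines, with no intermediate new_memories list and no case-sensitive filter.
import Mathlib
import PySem

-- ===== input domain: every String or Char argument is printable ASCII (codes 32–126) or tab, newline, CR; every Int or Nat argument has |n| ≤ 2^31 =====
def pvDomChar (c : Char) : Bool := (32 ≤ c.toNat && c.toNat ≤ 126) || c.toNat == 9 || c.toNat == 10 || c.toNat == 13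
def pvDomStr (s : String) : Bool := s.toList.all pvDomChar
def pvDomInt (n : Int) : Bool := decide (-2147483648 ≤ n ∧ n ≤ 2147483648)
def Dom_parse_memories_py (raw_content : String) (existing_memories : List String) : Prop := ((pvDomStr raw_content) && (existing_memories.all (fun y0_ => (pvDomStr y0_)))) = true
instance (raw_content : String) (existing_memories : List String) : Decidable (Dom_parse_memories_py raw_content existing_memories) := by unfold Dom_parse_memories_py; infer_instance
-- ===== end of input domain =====

-- B fuses A's three phases (parse new bullets with a case-sensitive filter, concatenate,
-- case-insensitive dedup pass) into one streaming dedup pass; objective: simpler.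

-- ===== PORT A =====
def parse_memories_py (raw_content : String) (existing_memories : List String) : List String :=
  let lines := (PySem.Str.split? (PySem.Str.strip raw_content) "\n").getD []   -- sep "\n" ≠ "": never none
  let new_memories := lines.foldl (fun (new_memories : List String) line =>
    let line := PySem.Str.strip line
    if PySem.Str.startswith line "- " then
      let memory := PySem.Str.strip (PySem.Str.slice line (some 2) none)
      if memory ≠ "" ∧ memory ∉ existing_memories then new_memories ++ [memory] else new_memories
    else new_memories) []
  let all_memories := existing_memories ++ new_memories
  let r := all_memories.foldl (fun (acc : List String × PySem.Set String) m =>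
    let m_lower := PySem.Str.lower m
    if acc.2.contains m_lower then acc else (acc.1 ++ [m], acc.2.add m_lower))
    ([], PySem.Set.empty)
  r.1

-- ===== PORT B =====
def parse_memories_py_alt (raw_content : String) (existing_memories : List String) : List String :=
  let s0 := existing_memories.foldl (fun (acc : List String × PySem.Set String) m =>
    let ml := PySem.Str.lower m
    if acc.2.contains ml then acc else (acc.1 ++ [m], acc.2.add ml))
    ([], PySem.Set.empty)
  let r := ((PySem.Str.split? (PySem.Str.strip raw_content) "\n").getD []).foldl
    (fun (acc : List String × PySem.Set String) line =>
      let line := PySem.Str.strip line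
      if PySem.Str.startswith line "- " then
        let memory := PySem.Str.strip (PySem.Str.slice line (some 2) none)
        if memory ≠ "" ∧ acc.2.contains (PySem.Str.lower memory) = false then
          (acc.1 ++ [memory], acc.2.add (PySem.Str.lower memory))
        else acc
      else acc) s0
  r.1

-- ===== PRECONDITION & SPEC =====
def Spec_parse_memories_py (raw_content : String) (existing_memories : List String) (out : List String) : Prop := out = parse_memories_py_alt raw_content existing_memories
instance (raw_content : String) (existing_memories : List String) (out : List String) : Decidable (Spec_parse_memories_py raw_content existing_memories out) := by unfold Spec_parse_memories_py; infer_instance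

-- ===== CLAIM (what is proved, stated in full; the proofs are below) =====
def Claim_equal_parse_memories_py : Prop := ∀ (raw_content : String) (existing_memories : List String), Dom_parse_memories_py raw_content existing_memories → Spec_parse_memories_py raw_content existing_memories (parse_memories_py raw_content existing_memories)

-- ===== LEMMAS AND PROOFS =====

def pvStep (acc : List String × PySem.Set String) (m : String) : List String × PySem.Set String :=
  if acc.2.contains (PySem.Str.lower m) then acc else (acc.1 ++ [m], acc.2.add (PySem.Str.lower m))

def pvParse? (line : String) : Option String :=
  let l := PySem.Str.strip line
  if PySem.Str.startswith l "- " then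
    let m := PySem.Str.strip (PySem.Str.slice l (some 2) none)
    if m ≠ "" then some m else none
  else none

lemma pvA_step (line : String) (existing : List String) (acc : List String) :
    (let l := PySem.Str.strip line
     if PySem.Str.startswith l "- " then
       let memory := PySem.Str.strip (PySem.Str.slice l (some 2) none)
       if memory ≠ "" ∧ memory ∉ existing then acc ++ [memory] else acc
     else acc)
    = (pvParse? line).elim acc (fun m => if m ∉ existing then acc ++ [m] else acc) := by
  unfold pvParse?
  by_cases h1 : PySem.Str.startswith (PySem.Str.strip line) "- " = true
  · by_cases h2 : PySem.Str.strip (PySem.Str.slice (PySem.Str.strip line) (some 2) none) = ""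
    · simp only [h1, if_true, h2, ne_eq, not_true_eq_false, false_and, if_false, Option.elim]
    · by_cases h3 : PySem.Str.strip (PySem.Str.slice (PySem.Str.strip line) (some 2) none) ∈ existing
      · simp only [h1, if_true, h2, h3, ne_eq, not_false_eq_true, not_true_eq_false, and_false, if_false, if_true, Option.elim]
      · simp only [h1, if_true, h2, h3, ne_eq, not_false_eq_true, and_true, if_true,
          Option.elim]
  · simp only [Bool.not_eq_true] at h1
    simp only [h1, Bool.false_eq_true, if_false, Option.elim]

lemma pvB_step (line : String) (acc : List String × PySem.Set String) :
    (let l := PySem.Str.strip line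
     if PySem.Str.startswith l "- " then
       let memory := PySem.Str.strip (PySem.Str.slice l (some 2) none)
       if memory ≠ "" ∧ acc.2.contains (PySem.Str.lower memory) = false then
         (acc.1 ++ [memory], acc.2.add (PySem.Str.lower memory))
       else acc
     else acc)
    = (pvParse? line).elim acc (pvStep acc) := by
  unfold pvParse? pvStep
  by_cases h1 : PySem.Str.startswith (PySem.Str.strip line) "- " = true
  · by_cases h2 : PySem.Str.strip (PySem.Str.slice (PySem.Str.strip line) (some 2) none) = ""
    · simp only [h1, if_true, h2, ne_eq, not_true_eq_false, false_and, if_false, Option.elim]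
    · by_cases h3 : acc.2.contains (PySem.Str.lower (PySem.Str.strip (PySem.Str.slice (PySem.Str.strip line) (some 2) none))) = true
      · simp only [h1, if_true, h2, h3, ne_eq, not_false_eq_true, true_and, Bool.true_eq_false,
          if_false, if_true, Option.elim]
      · simp only [Bool.not_eq_true] at h3
        simp only [h1, if_true, h2, h3, ne_eq, not_false_eq_true, true_and, if_true, if_false,
          Bool.false_eq_true, Option.elim]
  · simp only [Bool.not_eq_true] at h1
    simp only [h1, Bool.false_eq_true, if_false, Option.elim]


lemma pvB_loop (lines : List String) (acc : List String × PySem.Set String) :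
    lines.foldl (fun (acc : List String × PySem.Set String) line =>
      let line := PySem.Str.strip line
      if PySem.Str.startswith line "- " then
        let memory := PySem.Str.strip (PySem.Str.slice line (some 2) none)
        if memory ≠ "" ∧ acc.2.contains (PySem.Str.lower memory) = false then
          (acc.1 ++ [memory], acc.2.add (PySem.Str.lower memory))
        else acc
      else acc) acc
    = (lines.filterMap pvParse?).foldl pvStep acc := by
  induction lines generalizing acc with
  | nil => rw [List.foldl_nil, List.filterMap_nil, List.foldl_nil]
  | cons l ls ih =>
    simp only [List.foldl_cons, List.filterMap_cons]
    rw [pvB_step l acc]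
    cases pvParse? l with
    | none => exact ih acc
    | some m => exact ih (pvStep acc m)

-- A's first loop collects exactly the parsed memories outside existing_memories
lemma pvA_new (lines : List String) (existing : List String) (acc : List String) :
    lines.foldl (fun (new_memories : List String) line =>
      let line := PySem.Str.strip line
      if PySem.Str.startswith line "- " then
        let memory := PySem.Str.strip (PySem.Str.slice line (some 2) none)
        if memory ≠ "" ∧ memory ∉ existing then new_memories ++ [memory] else new_memories
      else new_memories) acc
    = acc ++ (lines.filterMap pvParse?).filter (fun m => decide (m ∉ existing)) := by
  induction lines generalizing acc with
  | nil => rw [List.foldl_nil, List.filterMap_nil, List.filter_nil, List.append_nil]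
  | cons l ls ih =>
    simp only [List.foldl_cons, List.filterMap_cons]
    rw [pvA_step l existing acc]
    cases pvParse? l with
    | none => exact ih acc
    | some m =>
      by_cases hm : m ∈ existing
      · have h1 : (if m ∉ existing then acc ++ [m] else acc) = acc := if_neg (by simp [hm])
        have h2 : (decide (m ∉ existing)) = false := by simp [hm]
        simp only [Option.elim, List.filter_cons, h1, h2, Bool.false_eq_true, if_false]
        exact ih acc
      · have h1 : (if m ∉ existing then acc ++ [m] else acc) = acc ++ [m] := if_pos hm
        have h2 : (decide (m ∉ existing)) = true := by simp [hm]
        simp only [Option.elim, List.filter_cons, h1, h2, if_true]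
        rw [ih (acc ++ [m]), List.append_assoc, List.singleton_append]

-- the seen-set only grows along the dedup fold
lemma pvStep_mono (ms : List String) (acc : List String × PySem.Set String) (x : String)
    (h : x ∈ acc.2) : x ∈ (ms.foldl pvStep acc).2 := by
  induction ms generalizing acc with
  | nil => exact h
  | cons m ms ih =>
    refine ih _ ?_
    simp only [pvStep]
    split_ifs with hc
    · exact h
    · exact (PySem.Set.mem_add _ _ _).mpr (Or.inl h)

-- after folding the dedup step over xs, every element's lowercase is in the seen-set
lemma pvSeen_all (xs : List String) (acc : List String × PySem.Set String) (m : String)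
    (hm : m ∈ xs) : PySem.Str.lower m ∈ (xs.foldl pvStep acc).2 := by
  induction xs generalizing acc with
  | nil => cases hm
  | cons x xs ih =>
    rcases List.mem_cons.mp hm with h | h
    · subst h
      refine pvStep_mono xs _ _ ?_
      simp only [pvStep]
      split_ifs with hc
      · exact List.contains_iff_mem.mp hc
      · exact (PySem.Set.mem_add _ _ _).mpr (Or.inr rfl)
    · exact ih _ h

-- if every existing memory's lowercase is already seen, the case-sensitive filter is redundant
lemma pvFilter_redundant (ms : List String) (existing : List String)
    (acc : List String × PySem.Set String)
    (H : ∀ m ∈ existing, PySem.Str.lower m ∈ acc.2) :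
    (ms.filter (fun m => decide (m ∉ existing))).foldl pvStep acc = ms.foldl pvStep acc := by
  induction ms generalizing acc with
  | nil => rfl
  | cons m ms ih =>
    by_cases hm : m ∈ existing
    · have hmem : PySem.Str.lower m ∈ acc.2 := H m hm
      have hstep : pvStep acc m = acc := by
        have : acc.2.contains (PySem.Str.lower m) = true := List.contains_iff_mem.mpr hmem
        simp only [pvStep, this, if_true]
      have h2 : (decide (m ∉ existing)) = false := by simp [hm]
      simp only [List.filter_cons, h2, Bool.false_eq_true, if_false, List.foldl_cons, hstep]
      exact ih acc H
    · have hH : ∀ x ∈ existing, PySem.Str.lower x ∈ (pvStep acc m).2 := by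
        intro x hx
        simp only [pvStep]
        split_ifs with hc
        · exact H x hx
        · exact (PySem.Set.mem_add _ _ _).mpr (Or.inl (H x hx))
      have h2 : (decide (m ∉ existing)) = true := by simp [hm]
      simp only [List.filter_cons, h2, if_true, List.foldl_cons]
      exact ih (pvStep acc m) hH

-- ===== VERDICT (by name: the statement is the Claim_ definition above) =====
theorem parse_memories_py_spec : Claim_equal_parse_memories_py := by
  intro raw_content existing _
  unfold Spec_parse_memories_py parse_memories_py parse_memories_py_alt
  simp only []
  rw [pvA_new, pvB_loop]
  have hstepA : (fun (acc : List String × PySem.Set String) m =>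
      let m_lower := PySem.Str.lower m
      if acc.2.contains m_lower then acc else (acc.1 ++ [m], acc.2.add m_lower)) = pvStep := rfl
  rw [List.nil_append, hstepA, List.foldl_append]
  rw [pvFilter_redundant _ existing _ (fun m hm => pvSeen_all existing _ m hm)]
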